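-- pv_equiv track=rewrite | github.com/Aiswarya-prasad/honeybee-cross-species-metagenomics | scripts/get_single_ortho_phylo.py | is_scp_MAG
-- ===== SOURCE A (Python) =====
-- def is_scp_MAG(gene_list, genomes, MAGs):
--     is_core_MAG = 0
--     is_single = True
--     num_genomes = len(genomes)
--     num_MAGs = len(MAGs)
--     match_count_genomes = dict()
--     match_count_MAGs = dict()
--     genomes_seen = set()
--     for gene in gene_list:
--         split_gene = gene.split('_')
--         genome_id = "_".join(split_gene[:-1])
--         if genome_id in MAGs:
--             if genome_id in genomes_seen:
--                 is_single = False
--             else: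
--                 genomes_seen.add(genome_id)
--             match_count_MAGs[genome_id] = match_count_MAGs.get(genome_id,0) + 1
--     nb_matches_MAGs = len(match_count_MAGs)
--     if nb_matches_MAGs == num_MAGs and is_single:
--         is_core_MAG = 1
--     return(is_core_MAG)
-- ===== SOURCE B (Python) =====
-- def is_scp_MAG(gene_list, genomes, MAGs):
--     # Sort-then-scan: sort the matched genome ids, then the list is single-copy
--     # core iff it has exactly len(MAGs) entries and no two adjacent (hence no
--     # two) entries are equal.  No seen-set, no flag, no count dict.
--     ids = sorted("_".join(gene.split('_')[:-1]) for gene in gene_list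
--                  if "_".join(gene.split('_')[:-1]) in MAGs)
--     if len(ids) != len(MAGs):
--         return 0
--     for a, b in zip(ids, ids[1:]):
--         if a == b:
--             return 0
--     return 1
-- ===== Notes on version B (the rewrite author's own statement) =====
-- stated objective: alternative
-- what changed: Replaces A's single stateful pass (seen-set, is_single flag, per-genome count dict, then a final dict-size test) by sort-then-scan: collect the matched genome ids, sort them, and decide by a length test plus an adjacent-duplicate scan over the sorted list with early return.
import Mathlib
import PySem

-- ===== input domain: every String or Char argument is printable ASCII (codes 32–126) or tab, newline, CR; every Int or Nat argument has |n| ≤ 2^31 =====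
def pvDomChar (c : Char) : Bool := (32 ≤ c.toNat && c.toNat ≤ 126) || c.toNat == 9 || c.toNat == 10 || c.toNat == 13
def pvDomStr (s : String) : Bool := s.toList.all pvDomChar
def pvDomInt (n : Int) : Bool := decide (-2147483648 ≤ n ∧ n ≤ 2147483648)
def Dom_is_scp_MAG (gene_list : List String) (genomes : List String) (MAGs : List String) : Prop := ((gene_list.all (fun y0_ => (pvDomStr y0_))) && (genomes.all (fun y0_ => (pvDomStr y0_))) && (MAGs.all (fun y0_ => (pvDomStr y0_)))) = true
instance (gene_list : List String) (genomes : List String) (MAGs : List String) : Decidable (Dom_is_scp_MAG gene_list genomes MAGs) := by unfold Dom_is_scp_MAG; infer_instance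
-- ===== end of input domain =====

-- B replaces A's stateful loop (seen-set, is_single flag, count dict) by sort-then-scan over the
-- matched genome ids (length test + adjacent-duplicate scan); same result (objective: alternative).

-- ===== PORT A =====
-- genome_id = "_".join(gene.split('_')[:-1]); split? is total here since the separator "_" is nonempty
def pvGid (gene : String) : String :=
  PySem.Str.join "_" (PySem.List.slice ((PySem.Str.split? gene "_").getD []) none (some (-1)))

-- loop body of A: state = (is_single, genomes_seen, match_count_MAGs)
def pvStepA (MAGs : List String) (st : Bool × PySem.Set String × PySem.Dict String Int)
    (gene : String) : Bool × PySem.Set String × PySem.Dict String Int :=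
  let genome_id := pvGid gene
  if MAGs.contains genome_id then
    (if PySem.Set.contains st.2.1 genome_id then false else st.1,
     if PySem.Set.contains st.2.1 genome_id then st.2.1 else PySem.Set.add st.2.1 genome_id,
     st.2.2.insert genome_id (st.2.2.getD genome_id 0 + 1))
  else st

def is_scp_MAG (gene_list : List String) (_genomes : List String) (MAGs : List String) : Int :=
  let is_core_MAG : Int := 0
  let num_MAGs : Int := (MAGs.length : Int)
  let st := gene_list.foldl (pvStepA MAGs) (true, PySem.Set.empty, PySem.Dict.empty)
  let nb_matches_MAGs : Int := (st.2.2.size : Int)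
  if nb_matches_MAGs == num_MAGs && st.1 then 1 else is_core_MAG

-- ===== PORT B =====
-- the early-return scan over adjacent pairs of the sorted id list
def pvAdjScan : List String → Int
  | a :: b :: t => if a == b then 0 else pvAdjScan (b :: t)
  | _ => 1

def is_scp_MAG_alt (gene_list : List String) (_genomes : List String) (MAGs : List String) : Int :=
  let ids := PySem.List.sorted
    ((gene_list.filter (fun g => MAGs.contains (pvGid g))).map pvGid) (fun s => s) false
  if ids.length ≠ MAGs.length then 0 else pvAdjScan ids

-- ===== PRECONDITION & SPEC =====
def Spec_is_scp_MAG (gene_list : List String) (genomes : List String) (MAGs : List String) (out : Int) : Prop := out = is_scp_MAG_alt gene_list genomes MAGs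
instance (gene_list : List String) (genomes : List String) (MAGs : List String) (out : Int) : Decidable (Spec_is_scp_MAG gene_list genomes MAGs out) := by unfold Spec_is_scp_MAG; infer_instance

-- ===== CLAIM (what is proved, stated in full; the proofs are below) =====
def Claim_equal_is_scp_MAG : Prop := ∀ (gene_list : List String) (genomes : List String) (MAGs : List String), Dom_is_scp_MAG gene_list genomes MAGs → Spec_is_scp_MAG gene_list genomes MAGs (is_scp_MAG gene_list genomes MAGs)

-- ===== LEMMAS AND PROOFS =====

-- "all match counts are 1" read off A's dict
def pvAllOne (d : PySem.Dict String Int) : Bool := d.values.all (fun v => v == 1)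

theorem pvCounter_snoc (m : List String) (k : String) :
    (PySem.Dict.counter m).insert k ((PySem.Dict.counter m).getD k 0 + 1)
      = PySem.Dict.counter (m ++ [k]) := by
  rw [← PySem.Dict.foldl_insert_getD_add_one_eq_counter m,
      ← PySem.Dict.foldl_insert_getD_add_one_eq_counter (m ++ [k]), List.foldl_append]
  rfl

theorem pvCounter_snoc' (m : List String) (k : String) :
    (PySem.Dict.counter m).insert k ((List.count k m : Int) + 1)
      = PySem.Dict.counter (m ++ [k]) := by
  rw [← PySem.Dict.getD_counter, pvCounter_snoc]

theorem pvOfList_snoc (m : List String) (k : String) :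
    PySem.Set.ofList (m ++ [k]) = PySem.Set.add (PySem.Set.ofList m) k := by
  rw [PySem.Set.ofList_eq_foldl, PySem.Set.ofList_eq_foldl, List.foldl_append]
  rfl

theorem pvOfList_snoc_mem (m : List String) (k : String) (hk : k ∈ m) :
    PySem.Set.ofList (m ++ [k]) = PySem.Set.ofList m := by
  rw [pvOfList_snoc]
  simp [PySem.Set.add, hk]

theorem pvOfList_snoc_not_mem (m : List String) (k : String) (hk : k ∉ m) :
    PySem.Set.ofList (m ++ [k]) = PySem.Set.ofList m ++ [k] := by
  rw [pvOfList_snoc]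
  simp [PySem.Set.add, hk]

theorem pvAllOne_counter (m : List String) :
    pvAllOne (PySem.Dict.counter m)
      = (PySem.Set.ofList m).all (fun j => ((List.count j m : Int) == 1)) := by
  simp [pvAllOne, PySem.Dict.values, PySem.Dict.items_counter, List.all_map, Function.comp_def]

theorem pvAllOne_snoc (m : List String) (k : String) :
    pvAllOne (PySem.Dict.counter (m ++ [k]))
      = if k ∈ m then false else pvAllOne (PySem.Dict.counter m) := by
  by_cases hk : k ∈ m
  · simp only [hk, if_true, pvAllOne_counter]
    have hmem : k ∈ PySem.Set.ofList (m ++ [k]) := by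
      rw [PySem.Set.mem_ofList]; exact List.mem_append_left _ hk
    have hcnt : List.count k (m ++ [k]) = List.count k m + 1 := by
      simp [List.count_append]
    have hpos : 0 < List.count k m := List.count_pos_iff.mpr hk
    rw [List.all_eq_false]
    refine ⟨k, hmem, ?_⟩
    simp only [hcnt, beq_iff_eq]
    intro h
    omega
  · simp only [hk, if_false, pvAllOne_counter]
    rw [pvOfList_snoc_not_mem m k hk, List.all_append]
    have h1 : List.all [k] (fun j => ((List.count j (m ++ [k]) : Int) == 1)) = true := by
      have : List.count k m = 0 := List.count_eq_zero.mpr hk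
      simp [List.count_append, this]
    rw [h1, Bool.and_true]
    rw [Bool.eq_iff_iff]
    simp only [List.all_eq_true]
    have hsame : ∀ j ∈ PySem.Set.ofList m, List.count j (m ++ [k]) = List.count j m := by
      intro j hj
      have hjm : j ∈ m := (PySem.Set.mem_ofList m j).mp hj
      have hjk : j ∉ [k] := by
        simp only [List.mem_singleton]
        exact fun he => hk (he ▸ hjm)
      rw [List.count_append, List.count_eq_zero.mpr hjk]
      omega
    constructor
    · intro h j hj; rw [← hsame j hj]; exact h j hj
    · intro h j hj; rw [hsame j hj]; exact h j hj

theorem pvLoopA (MAGs : List String) (l : List String) : ∀ (m : List String),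
    l.foldl (pvStepA MAGs)
      (pvAllOne (PySem.Dict.counter m), PySem.Set.ofList m, PySem.Dict.counter m)
      = (pvAllOne (PySem.Dict.counter (m ++ (l.map pvGid).filter (fun g => MAGs.contains g))),
         PySem.Set.ofList (m ++ (l.map pvGid).filter (fun g => MAGs.contains g)),
         PySem.Dict.counter (m ++ (l.map pvGid).filter (fun g => MAGs.contains g))) := by
  induction l with
  | nil => intro m; simp
  | cons g t ih =>
    intro m
    rw [List.foldl_cons]
    by_cases hmatch : pvGid g ∈ MAGs
    · have hstep : pvStepA MAGs
          (pvAllOne (PySem.Dict.counter m), PySem.Set.ofList m, PySem.Dict.counter m) g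
          = (pvAllOne (PySem.Dict.counter (m ++ [pvGid g])),
             PySem.Set.ofList (m ++ [pvGid g]),
             PySem.Dict.counter (m ++ [pvGid g])) := by
        by_cases hk : pvGid g ∈ m
        · simp [pvStepA, hmatch, hk, pvAllOne_snoc, pvOfList_snoc_mem m _ hk, pvCounter_snoc']
        · simp [pvStepA, hmatch, hk, pvAllOne_snoc, pvOfList_snoc_not_mem m _ hk,
                PySem.Set.add, pvCounter_snoc']
      rw [hstep, ih (m ++ [pvGid g])]
      have hfilter : ((g :: t).map pvGid).filter (fun g => MAGs.contains g)
          = pvGid g :: (t.map pvGid).filter (fun g => MAGs.contains g) := by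
        simp [hmatch]
      rw [hfilter]
      simp [List.append_assoc]
    · have hstep : pvStepA MAGs
          (pvAllOne (PySem.Dict.counter m), PySem.Set.ofList m, PySem.Dict.counter m) g
          = (pvAllOne (PySem.Dict.counter m), PySem.Set.ofList m, PySem.Dict.counter m) := by
        simp [pvStepA, hmatch]
      rw [hstep, ih m]
      have hfilter : ((g :: t).map pvGid).filter (fun g => MAGs.contains g)
          = (t.map pvGid).filter (fun g => MAGs.contains g) := by
        simp [hmatch]
      rw [hfilter]

theorem pvSize_counter (m : List String) :
    (PySem.Dict.counter m).size = (PySem.Set.ofList m).length := by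
  simp [PySem.Dict.size, PySem.Dict.items_counter]

theorem pvNodup_iff_len (ids : List String) :
    ids.Nodup ↔ ids.length = (PySem.Set.ofList ids).length := by
  constructor
  · intro h; rw [PySem.Set.ofList_eq_self_of_nodup ids h]
  · intro h
    have hfs : ids.toFinset = (PySem.Set.ofList ids).toFinset := by
      ext x
      simp [List.mem_toFinset, PySem.Set.mem_ofList]
    have hcard : ids.toFinset.card = ids.length := by
      rw [hfs, List.toFinset_card_of_nodup (PySem.Set.nodup_ofList ids), ← h]
    have hmc : (Multiset.ofList ids).toFinset.card = (Multiset.ofList ids).card := by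
      simpa using hcard
    simpa using Multiset.toFinset_card_eq_card_iff_nodup.mp hmc

-- the adjacent scan on a ≤-sorted list decides Nodup
theorem pvAdjScan_eq (l : List String) (hs : l.Pairwise (· ≤ ·)) :
    pvAdjScan l = if l.Nodup then 1 else 0 := by
  induction l with
  | nil => simp [pvAdjScan]
  | cons a t ih =>
    cases t with
    | nil => simp [pvAdjScan]
    | cons b t' =>
      have hab : a ≤ b := (List.pairwise_cons.mp hs).1 b (List.mem_cons_self)
      have htail : (b :: t').Pairwise (· ≤ ·) := (List.pairwise_cons.mp hs).2
      by_cases he : a = b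
      · have : ¬ (a :: b :: t').Nodup := by
          intro h
          exact (List.nodup_cons.mp h).1 (by simp [he])
        simp [pvAdjScan, he, this]
      · have hnotin : a ∉ b :: t' := by
          intro hmem
          rcases List.mem_cons.mp hmem with h | h
          · exact he h
          · have hba : b ≤ a := (List.pairwise_cons.mp htail).1 a h
            exact he (le_antisymm hab hba)
        rw [show pvAdjScan (a :: b :: t') = pvAdjScan (b :: t') by
              simp [pvAdjScan, he], ih htail]
        simp [List.nodup_cons, hnotin]

-- ===== VERDICT (by name: the statement is the Claim_ definition above) =====
theorem is_scp_MAG_spec : Claim_equal_is_scp_MAG := by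
  intro gene_list genomes MAGs _
  show is_scp_MAG gene_list genomes MAGs = is_scp_MAG_alt gene_list genomes MAGs
  set ids := (gene_list.map pvGid).filter (fun g => MAGs.contains g) with hids
  have h0 := pvLoopA MAGs gene_list []
  simp only [List.nil_append] at h0
  have hA : is_scp_MAG gene_list genomes MAGs
      = (if (((PySem.Dict.counter ids).size : Int) == (MAGs.length : Int))
           && pvAllOne (PySem.Dict.counter ids)
         then 1 else 0) := by
    simp only [is_scp_MAG]
    rw [show ((true, PySem.Set.empty, PySem.Dict.empty) :
          Bool × PySem.Set String × PySem.Dict String Int)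
        = (pvAllOne (PySem.Dict.counter ([] : List String)),
           PySem.Set.ofList ([] : List String), PySem.Dict.counter ([] : List String)) from rfl,
       h0]
  -- both sides equal the plain condition: ids has length |MAGs| and no duplicates
  have hAcond : is_scp_MAG gene_list genomes MAGs
      = (if ids.length = MAGs.length ∧ ids.Nodup then 1 else 0) := by
    rw [hA]
    by_cases hcond : ids.length = MAGs.length ∧ ids.Nodup
    · have hlen : ids.length = (PySem.Set.ofList ids).length := (pvNodup_iff_len ids).mp hcond.2
      have h1 : (((PySem.Dict.counter ids).size : Int) == (MAGs.length : Int)) = true := by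
        rw [pvSize_counter, ← hlen]; simp [hcond.1]
      have h2 : pvAllOne (PySem.Dict.counter ids) = true := by
        rw [pvAllOne_counter]
        simp only [List.all_eq_true, beq_iff_eq]
        intro j hj
        have := List.nodup_iff_count_eq_one.mp hcond.2 j ((PySem.Set.mem_ofList ids j).mp hj)
        exact_mod_cast this
      simp [h1, h2, hcond]
    · rw [if_neg hcond]
      by_cases hall : pvAllOne (PySem.Dict.counter ids) = true
      · -- all counts 1 ⇒ Nodup, so the length test must fail
        have hnd : ids.Nodup := by
          refine List.nodup_iff_count_eq_one.mpr (fun a ha => ?_)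
          rw [pvAllOne_counter] at hall
          have := (List.all_eq_true.mp hall) a ((PySem.Set.mem_ofList ids a).mpr ha)
          simp only [beq_iff_eq] at this
          exact_mod_cast this
        have hlen : ids.length ≠ MAGs.length := fun h => hcond ⟨h, hnd⟩
        have hlen' : ids.length = (PySem.Set.ofList ids).length := (pvNodup_iff_len ids).mp hnd
        have : (((PySem.Dict.counter ids).size : Int) == (MAGs.length : Int)) = false := by
          rw [pvSize_counter, ← hlen']
          simpa using hlen
        simp [this]
      · simp [Bool.eq_false_iff.mpr hall]
  have hBcond : is_scp_MAG_alt gene_list genomes MAGs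
      = (if ids.length = MAGs.length ∧ ids.Nodup then 1 else 0) := by
    simp only [is_scp_MAG_alt]
    rw [show (gene_list.filter (fun g => MAGs.contains (pvGid g))).map pvGid = ids by
          rw [hids, List.filter_map]; rfl]
    set s := PySem.List.sorted ids (fun s => s) false with hsdef
    have hperm : s.Perm ids := PySem.List.sorted_perm ids (fun s => s) false
    have hlen : s.length = ids.length := hperm.length_eq
    have hpw : s.Pairwise (· ≤ ·) := PySem.List.sorted_pairwise ids (fun s => s)
    rw [pvAdjScan_eq s hpw, hlen]
    have hs2 : s.Nodup ↔ ids.Nodup := hperm.nodup_iff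
    by_cases h1 : ids.length = MAGs.length <;> by_cases h2 : ids.Nodup <;>
      simp [h1, h2, hs2]
  rw [hAcond, hBcond]
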